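-- pv_equiv track=rewrite | github.com/Kevinwu901113/ano-rag | graph/graph_retriever.py | _deduplicate_paths
-- ===== SOURCE A (Python) =====
-- from typing import List, Dict, Any, Set, Tuple, Optional
--
-- def _deduplicate_paths(paths: List[List[str]]) -> List[List[str]]:
--     """去重路径"""
--     unique_paths = []
--     seen_paths = set()
--
--     for path in paths:
--         # 创建路径的标准化表示（考虑双向性）
--         forward_key = tuple(path)
--         backward_key = tuple(reversed(path))
--
--         if forward_key not in seen_paths and backward_key not in seen_paths:
--             seen_paths.add(forward_key)
--             unique_paths.append(path)
--
--     return unique_paths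
-- ===== SOURCE B (Python) =====
-- from typing import List
--
-- def _deduplicate_paths(paths: List[List[str]]) -> List[List[str]]:
--     """Dedup paths treating reversed paths as equal, by repeated select-and-filter:
--     take the first remaining path, then sweep away every later occurrence of it or
--     its reverse; no set/dict of seen keys is maintained."""
--     result = []
--     remaining = list(paths)
--     while remaining:
--         head = remaining[0]
--         rev = head[::-1]
--         result.append(head)
--         remaining = [p for p in remaining[1:] if p != head and p != rev]
--     return result
-- ===== Notes on version B (the rewrite author's own statement) =====
-- stated objective: alternative
-- what changed: Replaces A's single pass with a growing seen-set of forward keys by repeated select-and-filter: keep the first remaining path and filter both its orientations out of the tail, so no seen structure exists at all.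
import Mathlib
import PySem

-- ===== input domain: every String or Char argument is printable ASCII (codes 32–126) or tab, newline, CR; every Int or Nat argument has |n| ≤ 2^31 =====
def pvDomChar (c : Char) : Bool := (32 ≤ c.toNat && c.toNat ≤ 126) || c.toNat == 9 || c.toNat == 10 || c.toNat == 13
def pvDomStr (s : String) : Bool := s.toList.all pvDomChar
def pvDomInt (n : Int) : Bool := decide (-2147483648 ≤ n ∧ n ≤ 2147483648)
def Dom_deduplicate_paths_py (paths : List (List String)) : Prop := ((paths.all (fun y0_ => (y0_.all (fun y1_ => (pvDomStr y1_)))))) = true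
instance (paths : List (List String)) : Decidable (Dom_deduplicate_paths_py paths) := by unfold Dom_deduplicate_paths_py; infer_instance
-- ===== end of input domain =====

-- B replaces A's single pass with a seen-set of forward keys by repeated
-- select-and-filter: keep the first remaining path, sweep both its orientations
-- out of the tail, repeat (objective: alternative; no seen structure at all).

-- ===== PORT A =====
-- state: (unique_paths, seen_paths); forward_key / backward_key are the path and its reverse
def deduplicate_paths_py (paths : List (List String)) : List (List String) :=
  (paths.foldl
    (fun (st : List (List String) × PySem.Set (List String)) path =>
      let forwardKey := path
      let backwardKey := path.reverse
      if !(PySem.Set.contains st.2 forwardKey) && !(PySem.Set.contains st.2 backwardKey) then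
        (st.1 ++ [path], PySem.Set.add st.2 forwardKey)
      else st)
    ([], PySem.Set.empty)).1

-- ===== PORT B =====
-- the while loop over `remaining`: take head, filter its two orientations out of the tail
def deduplicate_paths_py_alt : List (List String) → List (List String)
  | [] => []
  | head :: rest =>
    head :: deduplicate_paths_py_alt
      (rest.filter (fun p => !(p == head) && !(p == head.reverse)))
termination_by l => l.length
decreasing_by
  simpa using Nat.lt_succ_of_le (List.length_filter_le _ _)

-- ===== PRECONDITION & SPEC =====
def Spec_deduplicate_paths_py (paths : List (List String)) (out : List (List String)) : Prop := out = deduplicate_paths_py_alt paths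
instance (paths : List (List String)) (out : List (List String)) : Decidable (Spec_deduplicate_paths_py paths out) := by unfold Spec_deduplicate_paths_py; infer_instance

-- ===== CLAIM (what is proved, stated in full; the proofs are below) =====
def Claim_equal_deduplicate_paths_py : Prop := ∀ (paths : List (List String)), Dom_deduplicate_paths_py paths → Spec_deduplicate_paths_py paths (deduplicate_paths_py paths)

-- ===== LEMMAS AND PROOFS =====

-- A's fold starting from a state (u, u) equals u followed by B's recursion on the
-- input stripped of everything matching u in either orientation.
theorem dedup_loop_eq (xs : List (List String)) (u : List (List String)) :
    (xs.foldl
      (fun (st : List (List String) × PySem.Set (List String)) path =>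
        let forwardKey := path
        let backwardKey := path.reverse
        if !(PySem.Set.contains st.2 forwardKey) && !(PySem.Set.contains st.2 backwardKey) then
          (st.1 ++ [path], PySem.Set.add st.2 forwardKey)
        else st)
      (u, u)).1 =
    u ++ deduplicate_paths_py_alt
      (xs.filter (fun p => !(PySem.Set.contains u p) && !(PySem.Set.contains u p.reverse))) := by
  induction xs generalizing u with
  | nil => simp [deduplicate_paths_py_alt]
  | cons p rest ih =>
    simp only [List.foldl_cons, List.filter_cons]
    rcases hc : (!(PySem.Set.contains u p) && !(PySem.Set.contains u p.reverse)) with _ | _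
    · -- p matches u: A skips, B's input filter drops p
      simp only [Bool.false_eq_true, if_false]
      exact ih u
    · -- p fresh: A appends p and adds to the set; B keeps p and filters its orientations
      have hp : p ∉ u := by
        simp only [Bool.and_eq_true, Bool.not_eq_true'] at hc
        have := hc.1
        simpa [PySem.Set.contains_eq_listContains, List.contains_eq_mem] using this
      simp only [if_true, PySem.Set.add_of_not_mem hp]
      rw [ih (u ++ [p]), deduplicate_paths_py_alt, List.filter_filter]
      simp only [List.append_assoc, List.singleton_append]
      congr 2
      congr 1
      apply List.filter_congr
      intro q _
      have hrev : q.reverse = p ↔ q = p.reverse :=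
        ⟨fun h => by rw [← h, List.reverse_reverse], fun h => by rw [h, List.reverse_reverse]⟩
      by_cases h1 : q = p <;> by_cases h2 : q = p.reverse <;>
        by_cases h3 : q ∈ u <;> by_cases h4 : q.reverse ∈ u <;>
        simp [PySem.Set.contains_eq_listContains, List.contains_eq_mem, hrev, h1, h2, h3, h4]

-- ===== VERDICT (by name: the statement is the Claim_ definition above) =====
theorem deduplicate_paths_py_spec : Claim_equal_deduplicate_paths_py := by
  intro paths _
  unfold Spec_deduplicate_paths_py deduplicate_paths_py
  have h := dedup_loop_eq paths []
  simpa using h
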